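-- pv_equiv track=rewrite | github.com/magicx78/ha-scanservjs-addon | scanservjs-rag/app/app.py | _build_progress_steps
-- ===== SOURCE A (Python) =====
-- SEARCH_PHASE_ORDER = [
--     "started",
--     "retrieving",
--     "reranking",
--     "generating_answer",
--     "done",
-- ]
--
-- PHASE_LABELS = {
--     "idle": "Bereit",
--     "started": "Suche gestartet",
--     "retrieving": "Treffer werden geladen",
--     "reranking": "Treffer werden sortiert",
--     "generating_answer": "Antwort wird aufgebaut",
--     "done": "Abgeschlossen",
--     "error": "Fehler",
-- }
--
-- def _build_progress_steps(current_phase: str) -> list[dict]: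
--     steps = [{"phase": p, "label": PHASE_LABELS[p], "state": "pending"} for p in SEARCH_PHASE_ORDER]
--     if current_phase == "done":
--         for step in steps:
--             step["state"] = "done"
--         return steps
--     if current_phase == "error":
--         return steps
--     if current_phase == "idle":
--         return steps
--     if current_phase not in SEARCH_PHASE_ORDER:
--         return steps
--
--     active_idx = SEARCH_PHASE_ORDER.index(current_phase)
--     for idx, step in enumerate(steps):
--         if idx < active_idx:
--             step["state"] = "done"
--         elif idx == active_idx:
--             step["state"] = "active"
--     return steps
-- ===== SOURCE B (Python) =====
-- SEARCH_PHASE_ORDER = [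
--     "started",
--     "retrieving",
--     "reranking",
--     "generating_answer",
--     "done",
-- ]
--
-- PHASE_LABELS = {
--     "idle": "Bereit",
--     "started": "Suche gestartet",
--     "retrieving": "Treffer werden geladen",
--     "reranking": "Treffer werden sortiert",
--     "generating_answer": "Antwort wird aufgebaut",
--     "done": "Abgeschlossen",
--     "error": "Fehler",
-- }
--
--
-- def _step(phase: str, state: str) -> dict:
--     return {"phase": phase, "label": PHASE_LABELS[phase], "state": state}
--
--
-- def _build_progress_steps(current_phase: str) -> list[dict]:
--     if current_phase == "done":
--         # the whole pipeline has finished: every step is done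
--         return [_step(p, "done") for p in SEARCH_PHASE_ORDER]
--
--     def walk(phases: list[str], state: str) -> list[dict]:
--         # state machine: emit `state` until the current phase is reached,
--         # mark it active, and emit "pending" from then on
--         if not phases:
--             return []
--         p, rest = phases[0], phases[1:]
--         if p == current_phase:
--             return [_step(p, "active")] + walk(rest, "pending")
--         return [_step(p, state)] + walk(rest, state)
--
--     # idle, error and unknown phases never match, so everything stays pending
--     initial = "done" if current_phase in SEARCH_PHASE_ORDER else "pending"
--     return walk(SEARCH_PHASE_ORDER, initial)
-- ===== Notes on version B (the rewrite author's own statement) =====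
-- stated objective: alternative
-- what changed: B never computes an index: instead of A's build-all-pending list mutated by a second indexed pass with early returns, B does one recursive state-machine scan over the phase list that carries the state to emit and flips from 'done' to 'active' to 'pending' at the matched phase (plus an all-done short-circuit for the finished pipeline).
import Mathlib
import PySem

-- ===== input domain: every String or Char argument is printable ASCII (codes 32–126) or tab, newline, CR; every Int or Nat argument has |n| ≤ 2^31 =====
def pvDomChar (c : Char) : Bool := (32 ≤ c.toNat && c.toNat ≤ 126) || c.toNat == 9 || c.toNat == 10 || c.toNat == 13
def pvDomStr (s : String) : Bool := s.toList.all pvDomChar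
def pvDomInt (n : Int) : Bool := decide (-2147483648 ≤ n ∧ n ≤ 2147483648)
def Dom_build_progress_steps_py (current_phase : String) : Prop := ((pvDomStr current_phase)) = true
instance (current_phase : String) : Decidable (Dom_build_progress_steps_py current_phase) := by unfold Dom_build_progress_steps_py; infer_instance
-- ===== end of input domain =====

-- B replaces A's build-all-pending-then-mutate-by-index pass by an index-free recursive
-- state-machine scan that flips the emitted state at the matched phase (objective: alternative).

-- Shared module constants (SEARCH_PHASE_ORDER / PHASE_LABELS from the Python module).
def pvOrder : List String := ["started", "retrieving", "reranking", "generating_answer", "done"]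

def pvLabels : List (String × String) :=
  [("idle", "Bereit"), ("started", "Suche gestartet"), ("retrieving", "Treffer werden geladen"),
   ("reranking", "Treffer werden sortiert"), ("generating_answer", "Antwort wird aufgebaut"),
   ("done", "Abgeschlossen"), ("error", "Fehler")]

-- PHASE_LABELS[p]: first-match lookup; every p drawn from pvOrder is a key of pvLabels,
-- so the KeyError branch (the default) is unreachable in both ports.
def pvLabel (p : String) : String := ((pvLabels.find? (fun kv => kv.1 == p)).map (·.2)).getD ""

-- ===== PORT A =====
-- step["state"] = v : overwrite the existing "state" key in place (dict overwrite keeps position).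
def pvSetState (st : List (String × String)) (v : String) : List (String × String) :=
  st.map (fun kv => if kv.1 == "state" then (kv.1, v) else kv)

def build_progress_steps_py (current_phase : String) : List (List (String × String)) :=
  let steps := pvOrder.map (fun p => [("phase", p), ("label", pvLabel p), ("state", "pending")])
  if current_phase = "done" then
    steps.map (fun st => pvSetState st "done")
  else if current_phase = "error" then steps
  else if current_phase = "idle" then steps
  else if current_phase ∉ pvOrder then steps
  else
    match PySem.List.index? pvOrder current_phase with
    | none => steps   -- unreachable: current_phase ∈ pvOrder here
    | some active_idx =>
        (PySem.List.enumerate steps).map (fun iv =>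
          if iv.1 < (active_idx : Int) then pvSetState iv.2 "done"
          else if iv.1 = (active_idx : Int) then pvSetState iv.2 "active"
          else iv.2)

-- ===== PORT B =====
-- _step(phase, state)
def pvStep (p : String) (state : String) : List (String × String) :=
  [("phase", p), ("label", pvLabel p), ("state", state)]

-- the inner `walk` state machine of Source B
def pvWalk (cp : String) : List String → String → List (List (String × String))
  | [], _ => []
  | p :: rest, state =>
      if p = cp then pvStep p "active" :: pvWalk cp rest "pending"
      else pvStep p state :: pvWalk cp rest state

def build_progress_steps_py_alt (current_phase : String) : List (List (String × String)) :=
  if current_phase = "done" then pvOrder.map (fun p => pvStep p "done")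
  else pvWalk current_phase pvOrder (if current_phase ∈ pvOrder then "done" else "pending")

-- ===== PRECONDITION & SPEC =====
def Spec_build_progress_steps_py (current_phase : String) (out : List (List (String × String))) : Prop := out = build_progress_steps_py_alt current_phase
instance (current_phase : String) (out : List (List (String × String))) : Decidable (Spec_build_progress_steps_py current_phase out) := by unfold Spec_build_progress_steps_py; infer_instance

-- ===== CLAIM (what is proved, stated in full; the proofs are below) =====
def Claim_equal_build_progress_steps_py : Prop := ∀ (current_phase : String), Dom_build_progress_steps_py current_phase → Spec_build_progress_steps_py current_phase (build_progress_steps_py current_phase)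

-- ===== LEMMAS AND PROOFS =====

theorem pv_default_case (cp : String)
    (h1 : cp ≠ "started") (h2 : cp ≠ "retrieving") (h3 : cp ≠ "reranking")
    (h4 : cp ≠ "generating_answer") (h5 : cp ≠ "done")
    (h6 : cp ≠ "error") (h7 : cp ≠ "idle") :
    build_progress_steps_py cp = build_progress_steps_py_alt cp := by
  have hmem : cp ∉ pvOrder := by
    simp [pvOrder, h1, h2, h3, h4, h5]
  simp [build_progress_steps_py, build_progress_steps_py_alt, pvWalk, pvOrder,
        pvStep, h1, h2, h3, h4, h5, h6, h7, Ne.symm h1, Ne.symm h2, Ne.symm h3, Ne.symm h4, Ne.symm h5]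

-- ===== VERDICT (by name: the statement is the Claim_ definition above) =====
theorem build_progress_steps_py_spec : Claim_equal_build_progress_steps_py := by
  intro cp _
  unfold Spec_build_progress_steps_py
  by_cases h1 : cp = "started"; · subst h1; decide
  by_cases h2 : cp = "retrieving"; · subst h2; decide
  by_cases h3 : cp = "reranking"; · subst h3; decide
  by_cases h4 : cp = "generating_answer"; · subst h4; decide
  by_cases h5 : cp = "done"; · subst h5; decide
  by_cases h6 : cp = "error"; · subst h6; decide
  by_cases h7 : cp = "idle"; · subst h7; decide
  exact pv_default_case cp h1 h2 h3 h4 h5 h6 h7
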